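-- pv_equiv track=rewrite | github.com/kaivan29/collatz | Collatz.py | collatz_winner
-- ===== SOURCE A (Python) =====
-- meta_cache = [25, 27, 54, 55, 73, 97, 129, 171,
--               231, 235, 313, 327, 649, 654, 655, 667, 703, 871, 1161,
--               2223, 2322, 2323, 2463, 2919, 3711, 6171, 10971, 13255,
--               17647, 17673, 23529, 26623, 34239, 35497, 35655, 52527,
--               77031, 106239, 142587, 156159, 216367, 230631, 410011,
--               511935, 626331, 837799, 1117065, 1126015, 1501353, 1564063,
--               1723519, 2298025, 3064033, 3542887, 3732423, 5649499]
--
-- def collatz_winner(n):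
--     i = 0
--     total_len = len(meta_cache)
--     if n < 25:
--         return -1
--     if n > meta_cache[total_len - 1]:
--         return -1
--     while n >= meta_cache[i]:
--         i += 1
--     return meta_cache[i - 1]
-- ===== SOURCE B (Python) =====
-- meta_cache = [25, 27, 54, 55, 73, 97, 129, 171,
--               231, 235, 313, 327, 649, 654, 655, 667, 703, 871, 1161,
--               2223, 2322, 2323, 2463, 2919, 3711, 6171, 10971, 13255,
--               17647, 17673, 23529, 26623, 34239, 35497, 35655, 52527,
--               77031, 106239, 142587, 156159, 216367, 230631, 410011,
--               511935, 626331, 837799, 1117065, 1126015, 1501353, 1564063,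
--               1723519, 2298025, 3064033, 3542887, 3732423, 5649499]
--
-- def collatz_winner(n):
--     if n < 25:
--         return -1
--     if n > meta_cache[-1]:
--         return -1
--     lo, hi = 0, len(meta_cache)
--     while lo < hi:
--         mid = (lo + hi) // 2
--         if n < meta_cache[mid]:
--             hi = mid
--         else:
--             lo = mid + 1
--     return meta_cache[lo - 1]
-- ===== Notes on version B (the rewrite author's own statement) =====
-- stated objective: idiomatic
-- what changed: Replaced the sequential while-loop scan of the cache with a classic lo/hi binary search (bisect_right style), keeping both early-return guards.
-- outside the precondition, e.g. on collatz_winner(5649499): A raises IndexError, B returns 5649499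
-- crash fix: A raises IndexError at n = 5649499, the last cache value, where the scan runs past the end of the list; B's binary search returns 5649499 there. — e.g. on collatz_winner(5649499): A raises IndexError, B returns 5649499
import Mathlib
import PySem

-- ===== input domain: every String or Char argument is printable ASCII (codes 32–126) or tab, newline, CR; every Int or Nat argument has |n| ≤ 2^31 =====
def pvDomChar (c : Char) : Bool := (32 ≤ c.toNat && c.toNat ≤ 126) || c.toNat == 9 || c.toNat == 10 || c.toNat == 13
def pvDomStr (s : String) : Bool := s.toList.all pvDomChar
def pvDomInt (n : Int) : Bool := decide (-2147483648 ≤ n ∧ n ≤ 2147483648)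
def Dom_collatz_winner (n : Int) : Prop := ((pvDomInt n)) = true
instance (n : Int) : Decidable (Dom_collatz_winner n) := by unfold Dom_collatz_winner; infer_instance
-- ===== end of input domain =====

-- B replaces A's sequential while-loop scan of the cache with a lo/hi binary search (bisect_right style).

-- ===== PORT A =====
def metaCache : List Int := [25, 27, 54, 55, 73, 97, 129, 171,
  231, 235, 313, 327, 649, 654, 655, 667, 703, 871, 1161,
  2223, 2322, 2323, 2463, 2919, 3711, 6171, 10971, 13255,
  17647, 17673, 23529, 26623, 34239, 35497, 35655, 52527,
  77031, 106239, 142587, 156159, 216367, 230631, 410011,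
  511935, 626331, 837799, 1117065, 1126015, 1501353, 1564063,
  1723519, 2298025, 3064033, 3542887, 3732423, 5649499]

-- the while loop 'while n >= meta_cache[i]: i += 1' followed by 'return meta_cache[i - 1]',
-- as a structural recursion over the cache carrying the previously passed element
-- (= meta_cache[i-1]). The [] case is Python's IndexError, reached only at
-- n = 5649499, which Pre_ excludes.
def aWhile (n : Int) : List Int → Int → Int
  | [], prev => prev
  | x :: xs, prev => if n ≥ x then aWhile n xs x else prev

def collatz_winner (n : Int) : Int :=
  if n < 25 then -1
  else if n > metaCache.getD (56 - 1) 0 then -1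
  else aWhile n metaCache 0

-- ===== PORT B =====
-- the 'while lo < hi' binary-search loop of Source B; the fuel argument (8 at the call
-- site) only makes the recursion structural and is never exhausted, since the
-- gap hi - lo < 2^8 at the call and halves every iteration
def bLoop (n : Int) : Nat → Nat → Nat → Nat
  | 0, lo, _ => lo
  | fuel + 1, lo, hi =>
    if lo < hi then
      let mid := (lo + hi) / 2
      if n < metaCache.getD mid 0 then bLoop n fuel lo mid
      else bLoop n fuel (mid + 1) hi
    else lo

def collatz_winner_alt (n : Int) : Int :=
  if n < 25 then -1
  else if n > metaCache.getD (56 - 1) 0 then -1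
  else metaCache.getD (bLoop n 8 0 56 - 1) 0

-- ===== PRECONDITION & SPEC =====
-- Pre_ excludes only n = 5649499 (the last cache entry): there A's scan runs past the
-- end of the list and raises IndexError (B's binary search returns 5649499 instead).
def Pre_collatz_winner (n : Int) : Prop := n ≠ 5649499
instance (n : Int) : Decidable (Pre_collatz_winner n) := by unfold Pre_collatz_winner; infer_instance
def pvWitness_collatz_winner : Int := (1000)

-- A raises IndexError exactly at n = 5649499; B returns 5649499 there.
def Raises_collatz_winner (n : Int) : Prop := n = 5649499
instance (n : Int) : Decidable (Raises_collatz_winner n) := by unfold Raises_collatz_winner; infer_instance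
def pvRaiseWitness_collatz_winner : Int := (5649499)
def pvRaiseWitnessOut_collatz_winner : Int := 5649499

def Spec_collatz_winner (n : Int) (out : Int) : Prop := out = collatz_winner_alt n
instance (n : Int) (out : Int) : Decidable (Spec_collatz_winner n out) := by unfold Spec_collatz_winner; infer_instance

-- ===== CLAIM (what is proved, stated in full; the proofs are below) =====
def Claim_equal_collatz_winner : Prop := ∀ (n : Int), Dom_collatz_winner n → Pre_collatz_winner n → Spec_collatz_winner n (collatz_winner n)
def Claim_raises_collatz_winner : Prop := (∀ (n : Int), Dom_collatz_winner n → Raises_collatz_winner n → ¬ Pre_collatz_winner n) ∧ (Dom_collatz_winner (pvRaiseWitness_collatz_winner) ∧ Raises_collatz_winner (pvRaiseWitness_collatz_winner) ∧ collatz_winner_alt (pvRaiseWitness_collatz_winner) = pvRaiseWitnessOut_collatz_winner)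

-- ===== LEMMAS AND PROOFS =====

-- the predicate 'still passed by the scan' and the scan's stopping index
def pvPred (n : Int) : Int → Bool := fun x => decide (x ≤ n)
def pvC (n : Int) : Nat := (metaCache.takeWhile (pvPred n)).length

theorem aWhile_eq_takeWhile (n : Int) : ∀ (xs : List Int) (prev : Int),
    aWhile n xs prev = (xs.takeWhile (pvPred n)).getLastD prev := by
  intro xs
  induction xs with
  | nil => intro prev; rfl
  | cons a l ih =>
    intro prev
    by_cases h : a ≤ n
    · rw [aWhile, if_pos (show n ≥ a from h),
        List.takeWhile_cons_of_pos (show pvPred n a = true by simp [pvPred, h]),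
        List.getLastD_cons]
      exact ih a
    · rw [aWhile, if_neg (show ¬ n ≥ a from h),
        List.takeWhile_cons_of_neg (show ¬ pvPred n a = true by simp [pvPred, h])]
      rfl

theorem takeWhile_first_fail {α : Type} (p : α → Bool) :
    ∀ (l : List α) (h : (l.takeWhile p).length < l.length),
      p (l[(l.takeWhile p).length]'h) = false := by
  intro l
  induction l with
  | nil => intro h; simp at h
  | cons a l ih =>
    intro h
    by_cases hp : p a = true
    · simp only [List.takeWhile_cons, if_pos hp, List.length_cons] at h ⊢
      simpa using ih (by omega)
    · simp only [List.takeWhile_cons, if_neg hp] at h ⊢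
      simpa using hp

theorem pvC_le (n : Int) : pvC n ≤ 56 := by
  have h := (List.takeWhile_prefix (l := metaCache) (pvPred n)).length_le
  simpa [pvC, metaCache] using h

theorem pvF1 (n : Int) (i : Nat) (h : i < pvC n) : metaCache.getD i 0 ≤ n := by
  have hlen : metaCache.length = 56 := by decide
  have hi : i < metaCache.length := by have := pvC_le n; omega
  have htw : (metaCache.takeWhile (pvPred n)) =
      metaCache.take (pvC n) :=
    List.prefix_iff_eq_take.mp (List.takeWhile_prefix _)
  have hget : (metaCache.takeWhile (pvPred n))[i]? = metaCache[i]? := by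
    rw [htw, List.getElem?_take, if_pos h]
  have hmem : metaCache[i] ∈ metaCache.takeWhile (pvPred n) := by
    have : (metaCache.takeWhile (pvPred n))[i]? = some metaCache[i] := by
      rw [hget, List.getElem?_eq_getElem hi]
    exact List.mem_of_getElem? this
  have := List.mem_takeWhile_imp hmem
  simp only [pvPred, decide_eq_true_eq] at this
  rw [List.getD_eq_getElem?_getD, List.getElem?_eq_getElem hi]
  simpa using this

theorem pvF2 (n : Int) (i : Nat) (hc : pvC n ≤ i) (hi : i < 56) : n < metaCache.getD i 0 := by
  have hlen : metaCache.length = 56 := by decide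
  have hclen : pvC n < metaCache.length := by omega
  have hfail := takeWhile_first_fail (pvPred n) metaCache hclen
  simp only [pvPred, decide_eq_false_iff_not] at hfail
  have hcfail : ¬ metaCache[pvC n]'hclen ≤ n := hfail
  have hsort : metaCache.Pairwise (· ≤ ·) := by decide
  have hile : metaCache[pvC n]'hclen ≤ metaCache[i]'(by omega) := by
    rcases Nat.eq_or_lt_of_le hc with heq | hlt
    · simp [heq]
    · exact le_of_lt (List.pairwise_iff_getElem.mp (by decide : metaCache.Pairwise (· < ·))
        (pvC n) i hclen (by omega) hlt)
  rw [List.getD_eq_getElem?_getD, List.getElem?_eq_getElem (by omega : i < metaCache.length)]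
  simp only [Option.getD_some]
  omega

theorem bLoop_eq (n : Int) : ∀ (fuel lo hi : Nat), lo ≤ pvC n → pvC n ≤ hi → hi ≤ 56 →
    hi - lo < 2 ^ fuel → bLoop n fuel lo hi = pvC n := by
  intro fuel
  induction fuel with
  | zero =>
    intro lo hi h1 h2 h3 h4
    simp only [bLoop]
    simp only [pow_zero] at h4
    omega
  | succ fuel ih =>
    intro lo hi h1 h2 h3 h4
    rw [bLoop]
    by_cases hlh : lo < hi
    · rw [if_pos hlh]
      have hpow : (2:Nat) ^ (fuel + 1) = 2 * 2 ^ fuel := by ring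
      rw [hpow] at h4
      by_cases hcmp : n < metaCache.getD ((lo + hi) / 2) 0
      · rw [if_pos hcmp]
        have hcmid : pvC n ≤ (lo + hi) / 2 := by
          by_contra hx
          exact absurd (pvF1 n ((lo + hi) / 2) (by omega)) (by omega)
        exact ih lo ((lo + hi) / 2) h1 hcmid (by omega) (by omega)
      · rw [if_neg hcmp]
        have hmid : (lo + hi) / 2 + 1 ≤ pvC n := by
          by_contra hx
          exact absurd (pvF2 n ((lo + hi) / 2) (by omega) (by omega)) (by omega)
        exact ih ((lo + hi) / 2 + 1) hi hmid h2 h3 (by omega)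
    · rw [if_neg hlh]
      omega

theorem pvC_pos (n : Int) (h : 25 ≤ n) : 1 ≤ pvC n := by
  have : pvPred n 25 = true := by simp [pvPred]; omega
  simp [pvC, metaCache, List.takeWhile_cons, this]

theorem main_eq (n : Int) (h1 : ¬ n < 25) (h2 : ¬ n > 5649499) (_hp : n ≠ 5649499) :
    aWhile n metaCache 0 = metaCache.getD (bLoop n 8 0 56 - 1) 0 := by
  have hc1 : 1 ≤ pvC n := pvC_pos n (by omega)
  have hcle : pvC n ≤ 56 := pvC_le n
  have hb : bLoop n 8 0 56 = pvC n :=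
    bLoop_eq n 8 0 56 (by omega) hcle (le_refl _) (by norm_num)
  rw [hb, aWhile_eq_takeWhile n metaCache 0]
  have htw : (metaCache.takeWhile (pvPred n)) = metaCache.take (pvC n) :=
    List.prefix_iff_eq_take.mp (List.takeWhile_prefix _)
  rw [htw]
  have hlen : metaCache.length = 56 := by decide
  have hlt : (metaCache.take (pvC n)).length = pvC n := by
    rw [List.length_take]; omega
  rw [List.getLastD_eq_getLast?, List.getLast?_eq_getElem?, hlt,
    List.getElem?_take, if_pos (by omega : pvC n - 1 < pvC n),
    List.getD_eq_getElem?_getD]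

-- ===== VERDICT (by name: the statement is the Claim_ definition above) =====
theorem collatz_winner_spec : Claim_equal_collatz_winner := by
  intro n _ hpre
  unfold Pre_collatz_winner at hpre
  unfold Spec_collatz_winner collatz_winner collatz_winner_alt
  have hgd : metaCache.getD (56 - 1) 0 = 5649499 := by decide
  rw [hgd]
  by_cases h1 : n < 25
  · simp [h1]
  · by_cases h2 : n > 5649499
    · simp [h1, h2]
    · simp only [if_neg h1, if_neg h2]
      exact main_eq n h1 h2 hpre

@[simp] theorem collatz_winner_raises : Claim_raises_collatz_winner := by
  unfold Claim_raises_collatz_winner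
  refine ⟨?_, by decide, by decide, by decide⟩
  intro n _ h
  unfold Raises_collatz_winner at h
  unfold Pre_collatz_winner
  omega
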